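-- pv_equiv track=rewrite | github.com/tanjd/network-sec-project | utility.py | remove_firewall_rule_by_entry
-- ===== SOURCE A (Python) =====
-- def remove_firewall_rule_by_entry(entry, firewall_rules):
--     index = 1
--     for allow_or_deny, ip_addesses in firewall_rules.items():
--         for ip_address in ip_addesses:
--             if int(entry) == index:
--                 firewall_rules = remove_firewall_rule(
--                     allow_or_deny, ip_address, firewall_rules
--                 )
--                 return firewall_rules
--             index += 1
--     return firewall_rules
--
-- def remove_firewall_rule(allow_or_deny, ip_address, firewall_rules):
--     allow_or_deny = allow_or_deny.upper()
--
--     if ip_address.upper() in firewall_rules[allow_or_deny]: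
--         firewall_rules[allow_or_deny].remove(ip_address.upper())
--         return firewall_rules
--
--     if ip_address.lower() in firewall_rules[allow_or_deny]:
--         firewall_rules[allow_or_deny].remove(ip_address.lower())
--         return firewall_rules
--     return firewall_rules
-- ===== SOURCE B (Python) =====
-- def remove_firewall_rule_by_entry(entry, firewall_rules):
--     pairs = [(k, ip) for k, ips in firewall_rules.items() for ip in ips]
--     if not pairs:
--         return firewall_rules
--     i = int(entry) - 1
--     if 0 <= i < len(pairs):
--         k, ip = pairs[i]
--         key = k.upper()
--         if ip.upper() in firewall_rules[key]:
--             firewall_rules[key].remove(ip.upper())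
--         elif ip.lower() in firewall_rules[key]:
--             firewall_rules[key].remove(ip.lower())
--     return firewall_rules
-- ===== Notes on version B (the rewrite author's own statement) =====
-- stated objective: simpler
-- what changed: B materializes the flattened (key, ip) list once and picks pairs[int(entry)-1] by direct indexing, instead of A's nested counter-scan that re-evaluates int(entry) for every ip; the removal is done inline instead of via a helper.
import Mathlib
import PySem

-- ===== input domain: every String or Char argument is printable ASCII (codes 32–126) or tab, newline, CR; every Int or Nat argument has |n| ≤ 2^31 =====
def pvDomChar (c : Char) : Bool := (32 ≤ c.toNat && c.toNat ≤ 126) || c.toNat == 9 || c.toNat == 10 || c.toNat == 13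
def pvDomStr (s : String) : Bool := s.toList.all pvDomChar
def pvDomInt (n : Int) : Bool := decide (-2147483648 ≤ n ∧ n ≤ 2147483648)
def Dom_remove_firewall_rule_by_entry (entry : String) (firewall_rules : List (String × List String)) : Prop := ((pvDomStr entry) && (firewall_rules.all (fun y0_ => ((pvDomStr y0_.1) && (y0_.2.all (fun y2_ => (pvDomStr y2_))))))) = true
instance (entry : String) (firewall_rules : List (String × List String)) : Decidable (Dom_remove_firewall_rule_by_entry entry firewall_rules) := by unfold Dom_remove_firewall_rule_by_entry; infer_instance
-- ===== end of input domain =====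

-- B materializes the flattened (key, ip) pairs once and indexes, instead of A's counter scan
-- that re-parses int(entry) per element; return-value equivalence only (both mutate the dict in place identically).


-- ===== PORT A =====
-- dict primitives on the association list (shared by both ports, like PySem.Dict would be):
-- first-match lookup = firewall_rules[key], and replacement of the value at the first matching key
-- = the in-place mutation of that value's list (return value view).
def pvLookup (rs : List (String × List String)) (k : String) : Option (List String) :=
  match rs with
  | [] => none
  | (a, b) :: t => if a = k then some b else pvLookup t k

def pvSetFirst (rs : List (String × List String)) (k : String) (v : List String) : List (String × List String) :=
  match rs with
  | [] => []
  | (a, b) :: t => if a = k then (a, v) :: t else (a, b) :: pvSetFirst t k v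

-- helper remove_firewall_rule of A (KeyError = the `none` branch, excluded by Pre_)
def pvRemoveRule (allow_or_deny : String) (ip_address : String) (firewall_rules : List (String × List String)) : List (String × List String) :=
  let key := PySem.Str.upper allow_or_deny
  match pvLookup firewall_rules key with
  | none => firewall_rules
  | some l =>
    if PySem.Str.upper ip_address ∈ l then
      pvSetFirst firewall_rules key (l.erase (PySem.Str.upper ip_address))
    else if PySem.Str.lower ip_address ∈ l then
      pvSetFirst firewall_rules key (l.erase (PySem.Str.lower ip_address))
    else firewall_rules

-- the inner `for ip_address in ip_addesses` loop: either finds the match or passes the counter on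
def pvScanIps (n : Int) (idx : Int) (ips : List String) : Sum Int String :=
  match ips with
  | [] => .inl idx
  | ip :: t => if n = idx then .inr ip else pvScanIps n (idx + 1) t

-- the outer `for allow_or_deny, ip_addesses in firewall_rules.items()` loop
def pvScanItems (n : Int) (idx : Int) (items : List (String × List String)) : Option (String × String) :=
  match items with
  | [] => none
  | (k, ips) :: t =>
    match pvScanIps n idx ips with
    | .inr ip => some (k, ip)
    | .inl idx' => pvScanItems n idx' t

def remove_firewall_rule_by_entry (entry : String) (firewall_rules : List (String × List String)) : List (String × List String) :=
  match PySem.Int.ofStr? entry with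
  | none => firewall_rules  -- ValueError when some ip exists (excluded by Pre_); unreached otherwise
  | some n =>
    match pvScanItems n 1 firewall_rules with
    | some (k, ip) => pvRemoveRule k ip firewall_rules
    | none => firewall_rules

-- ===== PORT B =====
def remove_firewall_rule_by_entry_alt (entry : String) (firewall_rules : List (String × List String)) : List (String × List String) :=
  let pairs := firewall_rules.flatMap (fun p => p.2.map (fun ip => (p.1, ip)))
  if pairs = [] then firewall_rules
  else
    match PySem.Int.ofStr? entry with
    | none => firewall_rules  -- ValueError, excluded by Pre_
    | some n =>
      let i := n - 1
      if h : 0 ≤ i ∧ i.toNat < pairs.length then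
        let kip := pairs[i.toNat]
        let key := PySem.Str.upper kip.1
        match pvLookup firewall_rules key with
        | none => firewall_rules  -- KeyError, excluded by Pre_
        | some l =>
          if PySem.Str.upper kip.2 ∈ l then
            pvSetFirst firewall_rules key (l.erase (PySem.Str.upper kip.2))
          else if PySem.Str.lower kip.2 ∈ l then
            pvSetFirst firewall_rules key (l.erase (PySem.Str.lower kip.2))
          else firewall_rules
      else firewall_rules

-- ===== PRECONDITION & SPEC =====
-- Pre_ excludes exactly the inputs where A raises: ValueError when int(entry) fails with at least
-- one ip present, and KeyError when the selected key's .upper() is not a dict key.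
def Pre_remove_firewall_rule_by_entry (entry : String) (firewall_rules : List (String × List String)) : Prop :=
  firewall_rules.flatMap (fun p => p.2.map (fun ip => (p.1, ip))) = [] ∨
    ((PySem.Int.ofStr? entry).isSome = true ∧
      (if 0 ≤ (PySem.Int.ofStr? entry).getD 0 - 1 ∧
            ((PySem.Int.ofStr? entry).getD 0 - 1).toNat < (firewall_rules.flatMap (fun p => p.2.map (fun ip => (p.1, ip)))).length then
        PySem.Str.upper ((PySem.List.pyGetD (firewall_rules.flatMap (fun p => p.2.map (fun ip => (p.1, ip)))) ((PySem.Int.ofStr? entry).getD 0 - 1) ("", "")).1) ∈ firewall_rules.map Prod.fst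
      else True))

instance (entry : String) (firewall_rules : List (String × List String)) : Decidable (Pre_remove_firewall_rule_by_entry entry firewall_rules) := by
  unfold Pre_remove_firewall_rule_by_entry; infer_instance

def pvWitness_remove_firewall_rule_by_entry : String × (List (String × List String)) :=
  ("1", [("allow", ["1.2.3.4"]), ("ALLOW", ["1.2.3.4", "5.6.7.8"])])

def Spec_remove_firewall_rule_by_entry (entry : String) (firewall_rules : List (String × List String)) (out : List (String × List String)) : Prop := out = remove_firewall_rule_by_entry_alt entry firewall_rules
instance (entry : String) (firewall_rules : List (String × List String)) (out : List (String × List String)) : Decidable (Spec_remove_firewall_rule_by_entry entry firewall_rules out) := by unfold Spec_remove_firewall_rule_by_entry; infer_instance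

-- ===== CLAIM (what is proved, stated in full; the proofs are below) =====
def Claim_equal_remove_firewall_rule_by_entry : Prop := ∀ (entry : String) (firewall_rules : List (String × List String)), Dom_remove_firewall_rule_by_entry entry firewall_rules → Pre_remove_firewall_rule_by_entry entry firewall_rules → Spec_remove_firewall_rule_by_entry entry firewall_rules (remove_firewall_rule_by_entry entry firewall_rules)

-- ===== LEMMAS AND PROOFS =====

theorem pvScanIps_eq (n idx : Int) (ips : List String) :
    pvScanIps n idx ips =
      if h : idx ≤ n ∧ (n - idx).toNat < ips.length then .inr ips[(n - idx).toNat]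
      else .inl (idx + ips.length) := by
  induction ips generalizing idx with
  | nil => simp [pvScanIps]
  | cons ip t ih =>
    simp only [pvScanIps]
    by_cases hn : n = idx
    · subst hn; simp
    · rw [if_neg hn, ih (idx + 1)]
      by_cases h1 : idx + 1 ≤ n ∧ (n - (idx + 1)).toNat < t.length
      · rw [dif_pos h1, dif_pos (by constructor <;> [omega; (simp; omega)])]
        congr 1
        have : (n - idx).toNat = (n - (idx + 1)).toNat + 1 := by omega
        simp [this]
      · rw [dif_neg h1, dif_neg (by simp; omega)]
        congr 1
        simp only [List.length_cons]
        push_cast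
        omega

theorem pvScanItems_eq (n idx : Int) (items : List (String × List String)) :
    pvScanItems n idx items =
      (let pairs := items.flatMap (fun p => p.2.map (fun ip => (p.1, ip)))
       if h : idx ≤ n ∧ (n - idx).toNat < pairs.length then some pairs[(n - idx).toNat]
       else none) := by
  induction items generalizing idx with
  | nil => simp [pvScanItems]
  | cons p t ih =>
    obtain ⟨k, ips⟩ := p
    simp only [pvScanItems, pvScanIps_eq]
    by_cases h1 : idx ≤ n ∧ (n - idx).toNat < ips.length
    · rw [dif_pos h1]
      have hlt : (n - idx).toNat < (ips.map (fun ip => (k, ip))).length + (t.flatMap (fun p => p.2.map (fun ip => (p.1, ip)))).length := by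
        simp; omega
      simp only [List.flatMap_cons]
      rw [dif_pos ⟨h1.1, by simpa using hlt⟩]
      rw [List.getElem_append_left (by simpa using h1.2)]
      simp
    · rw [dif_neg h1]
      show pvScanItems n (idx + ips.length) t = _
      rw [ih]
      simp only [List.flatMap_cons, List.length_append, List.length_map]
      by_cases h2 : idx + ips.length ≤ n ∧ (n - (idx + ips.length)).toNat < (t.flatMap (fun p => p.2.map (fun ip => (p.1, ip)))).length
      · rw [dif_pos h2, dif_pos (by constructor <;> omega)]
        rw [List.getElem_append_right (by simp only [List.length_map]; omega)]
        congr 1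
        simp only [List.length_map]
        congr 1
        omega
      · rw [dif_neg h2, dif_neg (by omega)]

theorem pvLookup_isSome_iff (rs : List (String × List String)) (k : String) :
    (pvLookup rs k).isSome ↔ k ∈ rs.map Prod.fst := by
  induction rs with
  | nil => simp [pvLookup]
  | cons p t ih =>
    obtain ⟨a, b⟩ := p
    simp only [pvLookup]
    by_cases h : a = k
    · subst h; simp
    · simp [h, ih, Ne.symm h]

-- ===== VERDICT (by name: the statement is the Claim_ definition above) =====
theorem remove_firewall_rule_by_entry_spec : Claim_equal_remove_firewall_rule_by_entry := by
  intro entry rs _hdom hpre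
  unfold Spec_remove_firewall_rule_by_entry
  unfold remove_firewall_rule_by_entry remove_firewall_rule_by_entry_alt
  unfold Pre_remove_firewall_rule_by_entry at hpre
  simp only at hpre ⊢
  by_cases hemp : rs.flatMap (fun p => p.2.map (fun ip => (p.1, ip))) = []
  · rw [if_pos hemp]
    cases hof : PySem.Int.ofStr? entry with
    | none => rfl
    | some n =>
      show (match pvScanItems n 1 rs with
            | some (k, ip) => pvRemoveRule k ip rs
            | none => rs) = rs
      rw [pvScanItems_eq]
      simp only [hemp]
      simp
  · rw [if_neg hemp]
    cases hof : PySem.Int.ofStr? entry with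
    | none => rfl
    | some n =>
      show (match pvScanItems n 1 rs with
            | some (k, ip) => pvRemoveRule k ip rs
            | none => rs) = _
      rw [pvScanItems_eq]
      simp only
      by_cases h : (1 : Int) ≤ n ∧ (n - 1).toNat < (rs.flatMap (fun p => p.2.map (fun ip => (p.1, ip)))).length
      · rw [dif_pos h, dif_pos ⟨by omega, h.2⟩]
        rw [hof] at hpre
        simp only [Option.getD_some, Option.isSome_some] at hpre
        rcases hpre with hpre | hpre
        · exact absurd hpre hemp
        · rw [if_pos (by constructor <;> [omega; simpa using h.2])] at hpre
          rw [PySem.List.pyGetD_eq_getElem _ _ (by omega) (by omega)] at hpre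
          have hkey := (pvLookup_isSome_iff rs
            (PySem.Str.upper ((rs.flatMap (fun p => p.2.map (fun ip => (p.1, ip))))[(n - 1).toNat].1))).2 (by simpa using hpre.2)
          unfold pvRemoveRule
          cases hl : pvLookup rs
              (PySem.Str.upper ((rs.flatMap (fun p => p.2.map (fun ip => (p.1, ip))))[(n - 1).toNat].1)) with
          | none => rw [hl] at hkey; simp at hkey
          | some l => simp only [List.get_eq_getElem, hl]
      · rw [dif_neg h, dif_neg (by omega)]
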